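-- pv_equiv track=rewrite | github.com/pypi-data/pypi-mirror-357 | packages/openrecon/openrecon-0.1.7.tar.gz/openrecon-0.1.7/openrecon/webVulns/graphQL.py | _estimate_query_complexity
-- ===== SOURCE A (Python) =====
-- def _estimate_query_complexity(query: str) -> int:
--     """Estimate the complexity of a GraphQL query"""
--     complexity = 0
--
--     # Count nested levels
--     nested_level = 0
--     for char in query:
--         if char == '{':
--             nested_level += 1
--             complexity += nested_level
--         elif char == '}':
--             nested_level -= 1
--
--     # Count fields
--     fields = query.count('{') - query.count('fragment')
--     complexity += fields * 2
--
--     fragments = query.count('fragment')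
--     complexity += fragments * 10
--
--     aliases = query.count(':')
--     complexity += aliases * 5
--
--     list_indicators = ['s]', 's{', 's ', 's\n']
--     for indicator in list_indicators:
--         complexity += query.count(indicator) * 20
--
--     return complexity
-- ===== SOURCE B (Python) =====
-- def _estimate_query_complexity(query: str) -> int:
--     """Single pass over the string: per-position counters replace the loop plus five str.count scans."""
--     brace_sum = 0
--     level = 0
--     opens = 0
--     colons = 0
--     fragments = 0
--     list_hits = 0
--     n = len(query)
--     for i in range(n):
--         c = query[i]
--         if c == '{':
--             level += 1
--             brace_sum += level
--             opens += 1
--         elif c == '}':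
--             level -= 1
--         elif c == ':':
--             colons += 1
--         if query.startswith('fragment', i):
--             fragments += 1
--         if c == 's' and i + 1 < n and query[i + 1] in ']{ \n':
--             list_hits += 1
--     return brace_sum + (opens - fragments) * 2 + fragments * 10 + colons * 5 + list_hits * 20
-- ===== Notes on version B (the rewrite author's own statement) =====
-- stated objective: alternative
-- what changed: Replaced A's character loop plus five separate str.count scans by one single pass that carries the nesting level and per-position counters for '{', ':', 'fragment' and the four list indicators, assembling the same formula at the end.
import Mathlib
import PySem

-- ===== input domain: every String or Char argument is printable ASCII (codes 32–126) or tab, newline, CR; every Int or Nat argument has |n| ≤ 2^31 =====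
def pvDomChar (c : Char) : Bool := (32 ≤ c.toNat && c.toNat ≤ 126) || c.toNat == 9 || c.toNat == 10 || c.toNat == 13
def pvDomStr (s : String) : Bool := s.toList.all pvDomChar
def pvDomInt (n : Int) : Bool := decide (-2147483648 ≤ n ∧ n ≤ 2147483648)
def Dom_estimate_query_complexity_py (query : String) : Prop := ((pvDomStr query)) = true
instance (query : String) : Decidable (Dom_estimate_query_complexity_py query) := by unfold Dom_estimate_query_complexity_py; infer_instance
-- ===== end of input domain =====

-- B replaces A's char loop plus five separate str.count scans by one single pass with
-- per-position counters (objective: alternative decomposition, same O(n) cost).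

-- ===== PORT A =====
def estimate_query_complexity_py (query : String) : Int :=
  -- complexity/nested_level loop over the characters
  let st := query.toList.foldl (fun (st : Int × Int) c =>
      if c = '{' then (st.1 + (st.2 + 1), st.2 + 1)
      else if c = '}' then (st.1, st.2 - 1)
      else st) ((0 : Int), (0 : Int))
  let complexity := st.1
  let fields : Int := (PySem.Str.count query "{" : Int) - (PySem.Str.count query "fragment" : Int)
  let complexity := complexity + fields * 2
  let fragments : Int := (PySem.Str.count query "fragment" : Int)
  let complexity := complexity + fragments * 10
  let aliases : Int := (PySem.Str.count query ":" : Int)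
  let complexity := complexity + aliases * 5
  ["s]", "s{", "s ", "s\n"].foldl
    (fun acc ind => acc + (PySem.Str.count query ind : Int) * 20) complexity

-- ===== PORT B =====
-- single pass over the suffixes of the character list, carrying the nesting level;
-- returns (brace_sum, opens, colons, fragments, list_hits)
def pvScanB : List Char → Int → Int × Int × Int × Int × Int
  | [], _ => (0, 0, 0, 0, 0)
  | c :: t, level =>
    let level' := if c = '{' then level + 1 else if c = '}' then level - 1 else level
    let r := pvScanB t level'
    ( (if c = '{' then level + 1 else 0) + r.1,
      (if c = '{' then 1 else 0) + r.2.1,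
      (if c = ':' then 1 else 0) + r.2.2.1,
      (if "fragment".toList.isPrefixOf (c :: t) then 1 else 0) + r.2.2.2.1,
      (if c = 's' ∧ (t.head? = some ']' ∨ t.head? = some '{' ∨ t.head? = some ' ' ∨ t.head? = some '\n')
         then 1 else 0) + r.2.2.2.2 )

def estimate_query_complexity_py_alt (query : String) : Int :=
  let r := pvScanB query.toList 0
  r.1 + (r.2.1 - r.2.2.2.1) * 2 + r.2.2.2.1 * 10 + r.2.2.1 * 5 + r.2.2.2.2 * 20

-- ===== PRECONDITION & SPEC =====
def Spec_estimate_query_complexity_py (query : String) (out : Int) : Prop := out = estimate_query_complexity_py_alt query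
instance (query : String) (out : Int) : Decidable (Spec_estimate_query_complexity_py query out) := by unfold Spec_estimate_query_complexity_py; infer_instance

-- ===== CLAIM (what is proved, stated in full; the proofs are below) =====
def Claim_equal_estimate_query_complexity_py : Prop := ∀ (query : String), Dom_estimate_query_complexity_py query → Spec_estimate_query_complexity_py query (estimate_query_complexity_py query)

-- ===== LEMMAS AND PROOFS =====

-- per-position (overlapping) occurrence count of p among the suffixes of the list
def pvTCount (p : List Char) : List Char → Nat
  | [] => 0
  | c :: t => (if p.isPrefixOf (c :: t) then 1 else 0) + pvTCount p t

lemma pvTCount_skip (p : List Char) :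
    ∀ (n : Nat) (l : List Char), (∀ i, i < n → ¬ p <+: l.drop i) →
      pvTCount p l = pvTCount p (l.drop n) := by
  intro n
  induction n with
  | zero => intro l _; simp
  | succ m ih =>
    intro l h
    cases l with
    | nil => simp
    | cons c t =>
      have h0 : ¬ p <+: (c :: t) := by simpa using h 0 (Nat.succ_pos m)
      have : pvTCount p (c :: t) = pvTCount p t := by
        simp [pvTCount, h0]
      rw [this, ih t (fun i hi => by simpa using h (i + 1) (Nat.succ_lt_succ hi))]
      simp

lemma go_eq_tcount (p : List Char) (hp : p ≠ [])
    (hb : ∀ k, k < p.length → 0 < k → ¬ (p.drop k <+: p)) :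
    ∀ (fuel : Nat) (l : List Char) (acc : Nat), l.length ≤ fuel →
      PySem.Chars.count.go p fuel l acc = acc + pvTCount p l := by
  intro fuel
  induction fuel with
  | zero =>
    intro l acc hl
    have : l = [] := List.eq_nil_of_length_eq_zero (Nat.le_zero.1 hl)
    subst this
    simp [PySem.Chars.count.go, pvTCount]
  | succ f ih =>
    intro l acc hl
    cases l with
    | nil => simp [PySem.Chars.count.go, pvTCount]
    | cons c t =>
      by_cases hpre : p.isPrefixOf (c :: t)
      · have hpre' : p <+: (c :: t) := (List.isPrefixOf_iff_prefix).1 hpre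
        have hplen : 1 ≤ p.length := by
          cases p with
          | nil => exact absurd rfl hp
          | cons a b => simp
        -- no occurrence can start strictly inside the matched occurrence
        have hnone : ∀ i, i < p.length - 1 → ¬ p <+: t.drop i := by
          intro i hi hcontra
          have hk : (i + 1) < p.length := by omega
          obtain ⟨r, hr⟩ := hpre'
          have hdropped : (c :: t).drop (i + 1) = p.drop (i + 1) ++ r := by
            rw [← hr, List.drop_append_of_le_length (by omega)]
          have hpd : p <+: ((c :: t).drop (i + 1)) := by simpa using hcontra
          rw [hdropped] at hpd
          have hself : p.drop (i + 1) <+: (p.drop (i + 1) ++ r) := List.prefix_append _ _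
          rcases List.prefix_or_prefix_of_prefix hpd hself with h1 | h1
          · have := h1.length_le
            simp [List.length_drop] at this
            omega
          · exact hb (i + 1) hk (Nat.succ_pos i) h1
        have htc : pvTCount p (c :: t) = 1 + pvTCount p ((c :: t).drop p.length) := by
          have h1 : pvTCount p (c :: t) = 1 + pvTCount p t := by
            simp [pvTCount, hpre']
          have h2 : pvTCount p t = pvTCount p (t.drop (p.length - 1)) :=
            pvTCount_skip p (p.length - 1) t hnone
          have h3 : (c :: t).drop p.length = t.drop (p.length - 1) := by
            cases p with
            | nil => exact absurd rfl hp
            | cons a b => simp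
          rw [h1, h2, h3]
        have hstep : PySem.Chars.count.go p (f + 1) (c :: t) acc
            = PySem.Chars.count.go p f ((c :: t).drop p.length) (acc + 1) := by
          simp [PySem.Chars.count.go, hpre]
        rw [hstep, ih _ (acc + 1) (by simp [List.length_drop] at *; omega), htc]
        omega
      · have hstep : PySem.Chars.count.go p (f + 1) (c :: t) acc
            = PySem.Chars.count.go p f t acc := by
          simp [PySem.Chars.count.go, hpre]
        have hpre2 : ¬ p <+: (c :: t) := fun h => hpre ((List.isPrefixOf_iff_prefix).2 h)
        have htc : pvTCount p (c :: t) = pvTCount p t := by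
          simp [pvTCount, hpre2]
        rw [hstep, ih t acc (by simpa using Nat.lt_succ_iff.mp (by simpa using hl)), htc]

lemma count_eq_tcount (p : List Char) (hp : p ≠ [])
    (hb : ∀ k, k < p.length → 0 < k → ¬ (p.drop k <+: p)) (l : List Char) :
    PySem.Chars.count l p = pvTCount p l := by
  unfold PySem.Chars.count
  rw [if_neg (by simpa using hp)]
  simpa using go_eq_tcount p hp hb l.length l 0 le_rfl

-- pvScanB components 2..5 do not depend on the level and are the per-position counters
lemma pvScanB_opens : ∀ (t : List Char) (lvl : Int),
    (pvScanB t lvl).2.1 = (pvTCount ['{'] t : Int) := by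
  intro t
  induction t with
  | nil => intro lvl; simp [pvScanB, pvTCount]
  | cons c t ih =>
    intro lvl
    simp only [pvScanB, pvTCount, ih]
    by_cases h : c = '{'
    · simp [h, List.isPrefixOf]
    · simp [h, List.isPrefixOf, Ne.symm h]

lemma pvScanB_colons : ∀ (t : List Char) (lvl : Int),
    (pvScanB t lvl).2.2.1 = (pvTCount [':'] t : Int) := by
  intro t
  induction t with
  | nil => intro lvl; simp [pvScanB, pvTCount]
  | cons c t ih =>
    intro lvl
    simp only [pvScanB, pvTCount, ih]
    by_cases h : c = ':'
    · simp [h, List.isPrefixOf]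
    · simp [h, List.isPrefixOf, Ne.symm h]

lemma pvScanB_fragments : ∀ (t : List Char) (lvl : Int),
    (pvScanB t lvl).2.2.2.1 = (pvTCount "fragment".toList t : Int) := by
  intro t
  induction t with
  | nil => intro lvl; simp [pvScanB, pvTCount]
  | cons c t ih =>
    intro lvl
    simp only [pvScanB, pvTCount, ih]
    split_ifs <;> simp

lemma pvScanB_hits : ∀ (t : List Char) (lvl : Int),
    (pvScanB t lvl).2.2.2.2 =
      (pvTCount ['s', ']'] t : Int) + (pvTCount ['s', '{'] t : Int)
        + (pvTCount ['s', ' '] t : Int) + (pvTCount ['s', '\n'] t : Int) := by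
  intro t
  induction t with
  | nil => intro lvl; simp [pvScanB, pvTCount]
  | cons c t ih =>
    intro lvl
    simp only [pvScanB, pvTCount, ih]
    cases t with
    | nil => simp [List.isPrefixOf]
    | cons d t' =>
      simp only [List.head?_cons]
      by_cases hc : c = 's'
      · subst hc
        by_cases h1 : d = ']'
        · subst h1; simp [pvTCount, List.isPrefixOf]; ring
        · by_cases h2 : d = '{'
          · subst h2; simp [pvTCount, List.isPrefixOf]; ring
          · by_cases h3 : d = ' '
            · subst h3; simp [pvTCount, List.isPrefixOf]; ring
            · by_cases h4 : d = '\n'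
              · subst h4; simp [pvTCount, List.isPrefixOf]; ring
              · simp [pvTCount, List.isPrefixOf, h1, h2, h3, h4,
                  Ne.symm h1, Ne.symm h2, Ne.symm h3, Ne.symm h4]
      · simp [pvTCount, List.isPrefixOf, hc, Ne.symm hc]

-- A's nested-level loop equals scan component 1
lemma foldA_eq_scan : ∀ (cs : List Char) (a lvl : Int),
    (cs.foldl (fun (st : Int × Int) c =>
        if c = '{' then (st.1 + (st.2 + 1), st.2 + 1)
        else if c = '}' then (st.1, st.2 - 1)
        else st) (a, lvl)).1 = a + (pvScanB cs lvl).1 := by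
  intro cs
  induction cs with
  | nil => intro a lvl; simp [pvScanB]
  | cons c t ih =>
    intro a lvl
    by_cases h1 : c = '{'
    · simp only [List.foldl, h1, pvScanB, ih]
      simp; ring
    · by_cases h2 : c = '}'
      · simp only [List.foldl, pvScanB, if_neg h1, if_pos h2, ih]
        simp
      · simp only [List.foldl, pvScanB, if_neg h1, if_neg h2, ih]
        simp

-- ===== VERDICT (by name: the statement is the Claim_ definition above) =====
theorem estimate_query_complexity_py_spec : Claim_equal_estimate_query_complexity_py := by
  intro query _
  unfold Spec_estimate_query_complexity_py
  unfold estimate_query_complexity_py estimate_query_complexity_py_alt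
  simp only [PySem.Str.count, List.foldl]
  rw [foldA_eq_scan query.toList 0 0,
      count_eq_tcount "{".toList (by decide) (by decide),
      count_eq_tcount "fragment".toList (by decide) (by decide),
      count_eq_tcount ":".toList (by decide) (by decide),
      count_eq_tcount "s]".toList (by decide) (by decide),
      count_eq_tcount "s{".toList (by decide) (by decide),
      count_eq_tcount "s ".toList (by decide) (by decide),
      count_eq_tcount "s\n".toList (by decide) (by decide)]
  rw [pvScanB_opens query.toList 0, pvScanB_colons query.toList 0,
      pvScanB_fragments query.toList 0, pvScanB_hits query.toList 0]
  have h1 : "{".toList = ['{'] := rfl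
  have h2 : ":".toList = [':'] := rfl
  have h3 : "s]".toList = ['s', ']'] := rfl
  have h4 : "s{".toList = ['s', '{'] := rfl
  have h5 : "s ".toList = ['s', ' '] := rfl
  have h6 : "s\n".toList = ['s', '\n'] := rfl
  rw [h1, h2, h3, h4, h5, h6]
  push_cast
  ring
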